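-- pv_equiv track=rewrite | github.com/DeepLearnPhysics/spine-prod | src/file_handler.py | chunk_files
-- ===== SOURCE A (Python) =====
-- from typing import List
--
-- def chunk_files(
--     files: List[str], max_array_size: int, files_per_task: int
-- ) -> List[List[str]]:
--     """Split files into chunks for array jobs.
--
--     Parameters
--     ----------
--     files : List[str]
--         List of file paths to process
--     max_array_size : int
--         Maximum array size for SLURM job arrays
--     files_per_task : int
--         Number of files to process per array task
--
--     Returns
--     -------
--     List[List[str]]
--         List of file chunks, each chunk is a list of file groups,
--         where each group contains files_per_task individual files
--     """
--     # Group files by files_per_task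
--     file_groups = []
--     for i in range(0, len(files), files_per_task):
--         group = files[i : i + files_per_task]
--         file_groups.append(group)
--
--     # Split into chunks that fit array size limit
--     chunks = []
--     for i in range(0, len(file_groups), max_array_size):
--         chunks.append(file_groups[i : i + max_array_size])
--
--     return chunks
-- ===== SOURCE B (Python) =====
-- from typing import List
--
--
-- def chunk_files(
--     files: List[str], max_array_size: int, files_per_task: int
-- ) -> List[List[str]]:
--     """Single-pass grouping: accumulate files into the current group and the
--     current chunk as we stream over the list, never building the flat
--     file_groups list.  Non-positive sizes yield no chunks."""
--     if files_per_task < 1 or max_array_size < 1: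
--         return []
--     chunks = []
--     chunk = []
--     group = []
--     for f in files:
--         group.append(f)
--         if len(group) == files_per_task:
--             chunk.append(group)
--             group = []
--             if len(chunk) == max_array_size:
--                 chunks.append(chunk)
--                 chunk = []
--     if group:
--         chunk.append(group)
--     if chunk:
--         chunks.append(chunk)
--     return chunks
-- ===== Notes on version B (the rewrite author's own statement) =====
-- stated objective: alternative
-- what changed: Replaces the two sequential range/slice passes (group, then chunk the group list) by one streaming pass over the files with group/chunk/chunks accumulators, never materializing the flat file_groups list.
import Mathlib
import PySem

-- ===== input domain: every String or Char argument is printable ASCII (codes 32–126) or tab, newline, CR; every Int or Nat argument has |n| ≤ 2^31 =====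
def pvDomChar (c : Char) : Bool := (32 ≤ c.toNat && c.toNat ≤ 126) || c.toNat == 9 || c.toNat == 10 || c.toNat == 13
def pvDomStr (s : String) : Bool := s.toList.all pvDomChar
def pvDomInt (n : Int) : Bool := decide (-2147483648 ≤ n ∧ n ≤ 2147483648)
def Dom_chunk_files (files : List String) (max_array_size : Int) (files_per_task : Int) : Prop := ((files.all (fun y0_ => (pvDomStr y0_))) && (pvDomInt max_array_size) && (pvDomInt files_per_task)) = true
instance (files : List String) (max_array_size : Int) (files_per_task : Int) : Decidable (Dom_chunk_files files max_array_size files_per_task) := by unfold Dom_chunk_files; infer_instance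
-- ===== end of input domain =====

-- B replaces A's two sequential range/slice passes by one streaming pass with group/chunk accumulators (alternative decomposition, same cost); return values proved equal whenever A returns (Pre_ excludes only the zero step sizes, on which A raises ValueError).


-- ===== PORT A =====
-- literal transliteration of A: first loop builds file_groups by slicing with
-- stride files_per_task, second loop slices file_groups with stride max_array_size
def chunk_files (files : List String) (max_array_size : Int) (files_per_task : Int) : List (List (List String)) :=
  let file_groups : List (List String) :=
    (PySem.List.pyRange 0 files.length files_per_task).foldl
      (fun acc i => acc ++ [PySem.List.slice files (some i) (some (i + files_per_task))]) []
  (PySem.List.pyRange 0 file_groups.length max_array_size).foldl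
    (fun acc i => acc ++ [PySem.List.slice file_groups (some i) (some (i + max_array_size))]) []

-- ===== PORT B =====
-- B's single streaming pass: state (chunks, chunk, group)
def chunkFilesAltStep (max_array_size : Int) (files_per_task : Int)
    (st : List (List (List String)) × List (List String) × List String) (f : String) :
    List (List (List String)) × List (List String) × List String :=
  let chunks := st.1
  let chunk := st.2.1
  let group := st.2.2 ++ [f]
  if (group.length : Int) = files_per_task then
    let chunk := chunk ++ [group]
    if (chunk.length : Int) = max_array_size then (chunks ++ [chunk], [], [])
    else (chunks, chunk, [])
  else (chunks, chunk, group)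

def chunk_files_alt (files : List String) (max_array_size : Int) (files_per_task : Int) : List (List (List String)) :=
  if files_per_task < 1 ∨ max_array_size < 1 then []
  else
    let st := files.foldl (chunkFilesAltStep max_array_size files_per_task) ([], [], [])
    let chunks := st.1
    let chunk := st.2.1
    let group := st.2.2
    let chunk := if group ≠ [] then chunk ++ [group] else chunk
    if chunk ≠ [] then chunks ++ [chunk] else chunks

-- ===== PRECONDITION & SPEC =====
-- Pre_ excludes exactly the inputs where A raises: range() raises ValueError when a step
-- (files_per_task, or max_array_size in the second loop) is zero.
def Pre_chunk_files (files : List String) (max_array_size : Int) (files_per_task : Int) : Prop :=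
  files_per_task ≠ 0 ∧ max_array_size ≠ 0
instance (files : List String) (max_array_size : Int) (files_per_task : Int) : Decidable (Pre_chunk_files files max_array_size files_per_task) := by unfold Pre_chunk_files; infer_instance

def pvWitness_chunk_files : List String × Int × Int := (["a"], 1, 1)

def Spec_chunk_files (files : List String) (max_array_size : Int) (files_per_task : Int) (out : List (List (List String))) : Prop := out = chunk_files_alt files max_array_size files_per_task
instance (files : List String) (max_array_size : Int) (files_per_task : Int) (out : List (List (List String))) : Decidable (Spec_chunk_files files max_array_size files_per_task out) := by unfold Spec_chunk_files; infer_instance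

-- ===== CLAIM (what is proved, stated in full; the proofs are below) =====
def Claim_equal_chunk_files : Prop := ∀ (files : List String) (max_array_size : Int) (files_per_task : Int), Dom_chunk_files files max_array_size files_per_task → Pre_chunk_files files max_array_size files_per_task → Spec_chunk_files files max_array_size files_per_task (chunk_files files max_array_size files_per_task)

-- ===== LEMMAS AND PROOFS =====

-- canonical chunking: chunksOf k l splits l into consecutive pieces of size k+1
def chunksOf {α : Type} (k : Nat) : List α → List (List α)
  | [] => []
  | x :: xs => (x :: xs.take k) :: chunksOf k (xs.drop k)
  termination_by l => l.length
  decreasing_by simp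

theorem chunksOf_nil {α : Type} (k : Nat) : chunksOf (α := α) k [] = [] := by rw [chunksOf]

theorem chunksOf_cons {α : Type} (k : Nat) (x : α) (xs : List α) :
    chunksOf k (x :: xs) = (x :: xs.take k) :: chunksOf k (xs.drop k) := by rw [chunksOf]

theorem chunksOf_single {α : Type} (k : Nat) (l : List α) (hne : l ≠ []) (hlen : l.length ≤ k + 1) :
    chunksOf k l = [l] := by
  cases l with
  | nil => exact absurd rfl hne
  | cons x xs =>
    simp at hlen
    rw [chunksOf_cons, List.take_of_length_le hlen, List.drop_of_length_le hlen, chunksOf_nil]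

theorem chunksOf_append {α : Type} (k : Nat) (l₁ l₂ : List α) (h : l₁.length = k + 1) :
    chunksOf k (l₁ ++ l₂) = l₁ :: chunksOf k l₂ := by
  cases l₁ with
  | nil => simp at h
  | cons x xs =>
    simp at h
    rw [List.cons_append, chunksOf_cons, List.take_append_of_le_length (le_of_eq h.symm),
      List.drop_append_of_le_length (le_of_eq h.symm),
      List.take_of_length_le (le_of_eq h), List.drop_of_length_le (le_of_eq h)]
    simp

-- range(a, b, s) for a positive step peels its head
theorem pyRange_pos_cons (a b s : Int) (hs : 0 < s) (hab : a < b) :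
    PySem.List.pyRange a b s = a :: PySem.List.pyRange (a + s) b s := by
  rw [PySem.List.pyRange_of_pos a b hs, PySem.List.pyRange_of_pos (a + s) b hs]
  rw [if_pos hab]
  have hq : b - a + s - 1 = (b - a - 1) + 1 * s := by ring
  have h1 : (b - a + s - 1) / s = (b - a - 1) / s + 1 := by
    rw [hq, Int.add_mul_ediv_right _ _ (by omega : s ≠ 0)]
  by_cases h2 : a + s < b
  · have hq2 : b - (a + s) + s - 1 = b - a - 1 := by ring
    rw [if_pos h2, hq2, h1]
    have hnn : 0 ≤ (b - a - 1) / s := Int.ediv_nonneg (by omega) (by omega)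
    have htn : ((b - a - 1) / s + 1).toNat = ((b - a - 1) / s).toNat + 1 := by omega
    rw [htn, List.range_succ_eq_map]
    simp only [List.map_cons, List.map_map, Nat.cast_zero]
    refine congrArg₂ List.cons (by ring) ?_
    apply List.map_congr_left
    intro m _
    simp [Function.comp]
    ring
  · rw [if_neg h2, h1]
    rw [Int.ediv_eq_zero_of_lt (by omega) (by omega)]
    simp

-- range(a, b, s) for a positive step, empty case
theorem pyRange_pos_nil (a b s : Int) (hs : 0 < s) (hab : b ≤ a) :
    PySem.List.pyRange a b s = [] := by
  rw [PySem.List.pyRange_of_pos a b hs, if_neg (by omega)]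
  simp

-- range(0, n, s) for a negative step and 0 ≤ n is empty
theorem pyRange_neg_nil (n s : Int) (hs : s < 0) (hn : 0 ≤ n) :
    PySem.List.pyRange 0 n s = [] := by
  unfold PySem.List.pyRange
  rw [if_neg (by omega : ¬ s = 0)]
  simp only [if_neg (by omega : ¬ (0:Int) < s), if_neg (by omega : ¬ n < 0)]
  simp

-- range over the length of a list, negative step: empty
theorem pyRange_neg_nil_len {α : Type} (l : List α) (s : Int) (hs : s < 0) :
    PySem.List.pyRange 0 (l.length : Int) s = [] :=
  pyRange_neg_nil _ s hs (by positivity)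

-- range(0, 0, s) is empty for every step
theorem pyRange_zero_zero (s : Int) : PySem.List.pyRange 0 0 s = [] := by
  unfold PySem.List.pyRange
  split_ifs <;> simp_all

-- shift a positive-step range by its step
theorem pyRange_pos_shift (b s : Int) (hs : 0 < s) :
    PySem.List.pyRange s b s = (PySem.List.pyRange 0 (b - s) s).map (· + s) := by
  rw [PySem.List.pyRange_of_pos s b hs, PySem.List.pyRange_of_pos 0 (b - s) hs]
  by_cases h : s < b
  · rw [if_pos h, if_pos (by omega), List.map_map]
    have hc : b - s - 0 + s - 1 = b - s + s - 1 := by ring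
    rw [hc]
    apply List.map_congr_left
    intro m _
    simp [Function.comp]
    ring
  · rw [if_neg h, if_neg (by omega)]
    simp

-- the A-side slicing loop computes chunksOf
theorem foldA_eq_chunksOf {α : Type} (s : Int) (hs : 0 < s) :
    ∀ (n : Nat) (l : List α), l.length = n → ∀ (acc : List (List α)),
    (PySem.List.pyRange 0 l.length s).foldl
      (fun acc i => acc ++ [PySem.List.slice l (some i) (some (i + s))]) acc
      = acc ++ chunksOf (s.toNat - 1) l := by
  intro n
  induction n using Nat.strong_induction_on with
  | _ n ih =>
    intro l hlen acc
    cases l with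
    | nil => simp [chunksOf_nil, pyRange_pos_nil 0 0 s hs (le_refl 0)]
    | cons x xs =>
      have hpos : (0:Int) < (x :: xs).length := by simp
      rw [pyRange_pos_cons 0 _ s hs hpos, List.foldl_cons]
      have hslice0 : PySem.List.slice (x :: xs) (some 0) (some (0 + s)) = (x :: xs).take s.toNat := by
        rw [zero_add, PySem.List.slice_toNat _ (le_refl 0) (le_of_lt hs)]
        simp
      rw [hslice0, zero_add, pyRange_pos_shift _ s hs, List.foldl_map]
      by_cases hbig : ((x :: xs).length : Int) - s ≤ 0
      · -- everything fits in one chunk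
        rw [pyRange_pos_nil 0 _ s hs hbig, List.foldl_nil]
        rw [chunksOf_single _ _ (by simp) (by simp at hbig ⊢; omega)]
        rw [List.take_of_length_le (by simp at hbig ⊢; omega)]
      · -- peel the first chunk, recurse on the dropped list
        have hbig' : s < ((x :: xs).length : Int) := by omega
        have hdlen : (((x :: xs).drop s.toNat).length : Int) = ((x :: xs).length : Int) - s := by
          rw [List.length_drop]
          simp only [List.length_cons] at hbig' ⊢
          omega
        rw [← hdlen]
        have hcong : (PySem.List.pyRange 0 (((x :: xs).drop s.toNat).length : Int) s).foldl
            (fun acc i => acc ++ [PySem.List.slice (x :: xs) (some (i + s)) (some (i + s + s))])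
            (acc ++ [(x :: xs).take s.toNat])
            = (PySem.List.pyRange 0 (((x :: xs).drop s.toNat).length : Int) s).foldl
            (fun acc i => acc ++ [PySem.List.slice ((x :: xs).drop s.toNat) (some i) (some (i + s))])
            (acc ++ [(x :: xs).take s.toNat]) := by
          apply PySem.List.foldl_congr_mem
          intro a i hi
          have hnn : 0 ≤ i := ((PySem.List.mem_pyRange_iff_of_pos hs i).mp hi).1
          have h1 : PySem.List.slice (x :: xs) (some (i + s)) (some (i + s + s))
              = ((x :: xs).drop (i + s).toNat).take ((i + s + s).toNat - (i + s).toNat) :=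
            PySem.List.slice_toNat _ (by omega) (by omega)
          have h2 : PySem.List.slice ((x :: xs).drop s.toNat) (some i) (some (i + s))
              = (((x :: xs).drop s.toNat).drop i.toNat).take ((i + s).toNat - i.toNat) :=
            PySem.List.slice_toNat _ hnn (by omega)
          have e1 : (i + s + s).toNat - (i + s).toNat = (i + s).toNat - i.toNat := by omega
          have e2 : s.toNat + i.toNat = (i + s).toNat := by omega
          rw [h1, h2, List.drop_drop, e1, e2]
        have hlt : ((x :: xs).drop s.toNat).length < n := by
          rw [List.length_drop]
          simp only [List.length_cons] at hlen ⊢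
          omega
        rw [hcong, ih _ hlt _ rfl]
        have hkey : chunksOf (s.toNat - 1) (x :: xs)
            = (x :: xs).take s.toNat :: chunksOf (s.toNat - 1) ((x :: xs).drop s.toNat) := by
          conv_lhs => rw [← List.take_append_drop s.toNat (x :: xs)]
          apply chunksOf_append
          rw [List.length_take]
          simp at hbig ⊢
          omega
        rw [hkey]
        simp

-- the B-side streaming fold computes chunksOf of chunksOf
theorem foldB_eq (mas fpt : Int) (hm : 1 ≤ mas) (hf : 1 ≤ fpt) :
    ∀ (l : List String) (chunks : List (List (List String))) (chunk : List (List String)) (group : List String),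
    (group.length : Int) < fpt → (chunk.length : Int) < mas →
    (let st := l.foldl (chunkFilesAltStep mas fpt) (chunks, chunk, group)
     let chunk' := if st.2.2 ≠ [] then st.2.1 ++ [st.2.2] else st.2.1
     if chunk' ≠ [] then st.1 ++ [chunk'] else st.1)
      = chunks ++ chunksOf (mas.toNat - 1) (chunk ++ chunksOf (fpt.toNat - 1) (group ++ l)) := by
  intro l
  induction l with
  | nil =>
    intro chunks chunk group hg hc
    simp only [List.foldl_nil, List.append_nil]
    have hgroups : chunksOf (fpt.toNat - 1) group = if group = [] then [] else [group] := by
      by_cases hgnil : group = []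
      · simp [hgnil, chunksOf_nil]
      · rw [if_neg hgnil, chunksOf_single _ _ hgnil (by omega)]
    by_cases hgnil : group = []
    · rw [hgroups, if_pos hgnil, List.append_nil]
      by_cases hcnil : chunk = []
      · simp [hgnil, hcnil, chunksOf_nil]
      · rw [chunksOf_single _ _ hcnil (by omega)]
        simp [hgnil, hcnil]
    · rw [hgroups, if_neg hgnil]
      have hne : chunk ++ [group] ≠ [] := by simp
      rw [chunksOf_single _ _ hne (by simp at hc ⊢; omega)]
      simp [hgnil, hne]
  | cons f rest ih =>
    intro chunks chunk group hg hc
    rw [List.foldl_cons]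
    by_cases hgf : (((group ++ [f]).length : Nat) : Int) = fpt
    · have hgrp : chunksOf (fpt.toNat - 1) (group ++ f :: rest)
          = (group ++ [f]) :: chunksOf (fpt.toNat - 1) rest := by
        have hsplit : group ++ f :: rest = (group ++ [f]) ++ rest := by simp
        rw [hsplit]
        apply chunksOf_append
        simp at hgf ⊢
        omega
      by_cases hcf : (((chunk ++ [group ++ [f]]).length : Nat) : Int) = mas
      · have hstep : chunkFilesAltStep mas fpt (chunks, chunk, group) f
            = (chunks ++ [chunk ++ [group ++ [f]]], [], []) := by
          unfold chunkFilesAltStep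
          simp only [if_pos hgf, if_pos hcf]
        rw [hstep, ih _ _ _ (by simp; omega) (by simp; omega)]
        rw [hgrp]
        have hchk : chunksOf (mas.toNat - 1) (chunk ++ (group ++ [f]) :: chunksOf (fpt.toNat - 1) rest)
            = (chunk ++ [group ++ [f]]) :: chunksOf (mas.toNat - 1) (chunksOf (fpt.toNat - 1) rest) := by
          have hsplit : chunk ++ (group ++ [f]) :: chunksOf (fpt.toNat - 1) rest
              = (chunk ++ [group ++ [f]]) ++ chunksOf (fpt.toNat - 1) rest := by simp
          rw [hsplit]
          apply chunksOf_append
          simp at hcf ⊢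
          omega
        rw [hchk]
        simp
      · have hstep : chunkFilesAltStep mas fpt (chunks, chunk, group) f
            = (chunks, chunk ++ [group ++ [f]], []) := by
          unfold chunkFilesAltStep
          simp only [if_pos hgf, if_neg hcf]
        rw [hstep, ih _ _ _ (by simp; omega) (by simp at hcf ⊢; omega)]
        rw [hgrp]
        have hsplit : chunk ++ (group ++ [f]) :: chunksOf (fpt.toNat - 1) rest
            = (chunk ++ [group ++ [f]]) ++ chunksOf (fpt.toNat - 1) rest := by simp
        rw [hsplit]
        simp
    · have hstep : chunkFilesAltStep mas fpt (chunks, chunk, group) f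
          = (chunks, chunk, group ++ [f]) := by
        unfold chunkFilesAltStep
        simp only [if_neg hgf]
      rw [hstep, ih _ _ _ (by simp at hgf hg ⊢; omega) hc]
      have hsplit : group ++ f :: rest = (group ++ [f]) ++ rest := by simp
      rw [hsplit]


-- ===== VERDICT (by name: the statement is the Claim_ definition above) =====
theorem chunk_files_spec : Claim_equal_chunk_files := by
  intro files mas fpt _ hpre
  obtain ⟨hf, hm⟩ := hpre
  unfold Spec_chunk_files chunk_files chunk_files_alt
  by_cases hfp : 1 ≤ fpt
  · by_cases hmp : 1 ≤ mas
    · rw [if_neg (by omega)]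
      have hA1 := foldA_eq_chunksOf fpt (by omega) files.length files rfl []
      rw [hA1, List.nil_append]
      have hA2 := foldA_eq_chunksOf mas (by omega) _ (chunksOf (fpt.toNat - 1) files) rfl []
      rw [hA2, List.nil_append]
      have hB := foldB_eq mas fpt hmp hfp files [] [] [] (by simp; omega) (by simp; omega)
      simp only [List.nil_append] at hB
      exact hB.symm
    · -- max_array_size < 0: A's second loop is empty, B's guard returns []
      have hneg : mas < 0 := by omega
      have hx2 : ∀ (l : List (List String)) (init : List (List (List String))),
          (PySem.List.pyRange 0 (l.length : Int) mas).foldl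
            (fun acc i => acc ++ [PySem.List.slice l (some i) (some (i + mas))]) init = init := by
        intro l init
        rw [pyRange_neg_nil_len l mas hneg]
        simp
      rw [if_pos (by omega)]
      exact hx2 _ []
  · -- files_per_task < 0: A builds no groups, second loop over an empty list
    have hneg : fpt < 0 := by omega
    rw [if_pos (by omega)]
    rw [pyRange_neg_nil_len files fpt hneg]
    simp [pyRange_zero_zero]
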